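-- pv_equiv track=rewrite | github.com/maazza/inverter | src/main.py | inverse
-- ===== SOURCE A (Python) =====
-- from collections import deque
--
-- def inverse(inputs: list[int], n: int) -> list[int]:
--     res = deque()
--     multiples = []
--     for index, value in enumerate(inputs):
--         if not value % n:
--             multiples.append((index, value))
--         else:
--             res.appendleft(value)
--     for index, value in multiples:
--         res.insert(index, value)
--     return list(res)
-- ===== SOURCE B (Python) =====
-- def inverse(inputs: list[int], n: int) -> list[int]:
--     rev = [v for v in inputs if v % n][::-1]
--     it = iter(rev)
--     return [v if v % n == 0 else next(it) for v in inputs]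
-- ===== Notes on version B (the rewrite author's own statement) =====
-- stated objective: alternative
-- what changed: Replaced the deque built by appendleft plus repeated index inserts with one linear pass that keeps multiples of n in place and fills the other slots from the reversed list of non-multiples; fewer element moves asymptotically, but A's C-level deque operations keep measured times comparable.
-- outside the precondition, e.g. on inverse([], 0): A returns [], B returns []
import Mathlib
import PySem

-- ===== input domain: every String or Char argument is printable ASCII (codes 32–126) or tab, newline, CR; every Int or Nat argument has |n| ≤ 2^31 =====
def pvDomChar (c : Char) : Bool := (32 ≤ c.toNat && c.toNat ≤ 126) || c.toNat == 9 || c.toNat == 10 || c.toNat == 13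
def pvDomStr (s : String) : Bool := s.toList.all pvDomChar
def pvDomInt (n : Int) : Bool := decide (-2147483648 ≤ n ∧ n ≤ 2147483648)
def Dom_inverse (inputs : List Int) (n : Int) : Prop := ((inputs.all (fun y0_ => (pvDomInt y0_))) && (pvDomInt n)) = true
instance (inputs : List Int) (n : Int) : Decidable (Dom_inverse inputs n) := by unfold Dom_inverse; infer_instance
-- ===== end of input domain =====

-- B replaces A's deque-with-index-inserts construction by one linear pass filling gaps
-- from the reversed non-multiples (objective: alternative algorithm, same measured cost).

-- ===== PORT A =====
def inverse (inputs : List Int) (n : Int) : List Int :=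
  -- first loop: res (appendleft = cons) and multiples (append)
  let st := (PySem.List.enumerate inputs).foldl
    (fun (st : List Int × List (Int × Int)) iv =>
      if PySem.Int.mod iv.2 n = 0 then (st.1, st.2 ++ [iv])
      else (iv.2 :: st.1, st.2)) ([], [])
  -- second loop: res.insert(index, value)
  st.2.foldl (fun res iv => PySem.List.insert res iv.1 iv.2) st.1

-- ===== PORT B =====
def inverse_alt (inputs : List Int) (n : Int) : List Int :=
  let rev := (inputs.filter (fun v => !(PySem.Int.mod v n == 0))).reverse
  -- the comprehension with the iterator `it` as explicit state (next(it) never exhausts);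
  -- headD's default is never read since rev holds exactly one element per non-multiple
  (inputs.foldl (fun (st : List Int × List Int) v =>
     if PySem.Int.mod v n = 0 then (st.1 ++ [v], st.2)
     else (st.1 ++ [st.2.headD 0], st.2.tail)) ([], rev)).1

-- ===== PRECONDITION & SPEC =====
-- Pre_ excludes n = 0, on which Python's `value % n` raises ZeroDivisionError in both A and B
-- (only the empty-inputs case ([], 0) skips the division and returns [] in both).
def Pre_inverse (inputs : List Int) (n : Int) : Prop := n ≠ 0
instance (inputs : List Int) (n : Int) : Decidable (Pre_inverse inputs n) := by unfold Pre_inverse; infer_instance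
def pvWitness_inverse : List Int × Int := ([1, 2, 3, 4, 5], 2)

def Spec_inverse (inputs : List Int) (n : Int) (out : List Int) : Prop := out = inverse_alt inputs n
instance (inputs : List Int) (n : Int) (out : List Int) : Decidable (Spec_inverse inputs n out) := by unfold Spec_inverse; infer_instance

-- ===== CLAIM (what is proved, stated in full; the proofs are below) =====
def Claim_equal_inverse : Prop := ∀ (inputs : List Int) (n : Int), Dom_inverse inputs n → Pre_inverse inputs n → Spec_inverse inputs n (inverse inputs n)

-- ===== LEMMAS AND PROOFS =====

-- common shape: multiples of n stay in place, non-multiples are drawn from rs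
def pvMerge (n : Int) : List Int → List Int → List Int
  | [], _ => []
  | v :: vs, rs =>
      if PySem.Int.mod v n = 0 then v :: pvMerge n vs rs
      else rs.headD 0 :: pvMerge n vs rs.tail

-- multiples of n in xs, paired with their indices starting at k
def pvMult (n : Int) (k : Int) : List Int → List (Int × Int)
  | [] => []
  | v :: vs => if PySem.Int.mod v n = 0 then (k, v) :: pvMult n (k + 1) vs
               else pvMult n (k + 1) vs

theorem pvB_foldl (n : Int) (xs : List Int) (acc rs : List Int) :
    (xs.foldl (fun (st : List Int × List Int) v =>
       if PySem.Int.mod v n = 0 then (st.1 ++ [v], st.2)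
       else (st.1 ++ [st.2.headD 0], st.2.tail)) (acc, rs)).1
    = acc ++ pvMerge n xs rs := by
  induction xs generalizing acc rs with
  | nil => simp [pvMerge]
  | cons v vs ih =>
      simp only [List.foldl_cons]
      by_cases h : PySem.Int.mod v n = 0
      · rw [if_pos h, ih]; simp [pvMerge, h]
      · rw [if_neg h, ih]; simp [pvMerge, h]

theorem pvA_phase1 (n : Int) (xs : List Int) (k : Int) (acc : List Int)
    (mult : List (Int × Int)) :
    (PySem.List.enumerate xs k).foldl
      (fun (st : List Int × List (Int × Int)) iv =>
        if PySem.Int.mod iv.2 n = 0 then (st.1, st.2 ++ [iv])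
        else (iv.2 :: st.1, st.2)) (acc, mult)
    = ((xs.filter (fun v => !(PySem.Int.mod v n == 0))).reverse ++ acc,
       mult ++ pvMult n k xs) := by
  induction xs generalizing k acc mult with
  | nil => simp [PySem.List.enumerate_nil, pvMult]
  | cons v vs ih =>
      rw [PySem.List.enumerate_cons]
      by_cases h : PySem.Int.mod v n = 0 <;>
        simp [h, pvMult, ih, List.append_assoc]

theorem pvA_phase2 (n : Int) (xs : List Int) (P R : List Int)
    (hR : R.length = (xs.filter (fun v => !(PySem.Int.mod v n == 0))).length) :
    (pvMult n (P.length : Int) xs).foldl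
      (fun res iv => PySem.List.insert res iv.1 iv.2) (P ++ R)
    = P ++ pvMerge n xs R := by
  induction xs generalizing P R with
  | nil =>
      have : R = [] := by
        simpa using List.eq_nil_of_length_eq_zero (by simpa using hR)
      simp [pvMult, pvMerge, this]
  | cons v vs ih =>
      by_cases h : PySem.Int.mod v n = 0
      · have hins : PySem.List.insert (P ++ R) (P.length : Int) v
            = (P ++ [v]) ++ R := by
          rw [PySem.List.insert_natCast (P ++ R) P.length v (by simp)]
          simp
        have hlen : ((P.length : Int) + 1) = ((P ++ [v]).length : Int) := by
          simp
        have hR' : R.length = (vs.filter (fun v => !(PySem.Int.mod v n == 0))).length := by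
          simpa [h] using hR
        rw [pvMult, if_pos h, List.foldl_cons]
        show (pvMult n ((P.length : Int) + 1) vs).foldl _ (PySem.List.insert (P ++ R) (P.length : Int) v) = _
        rw [hins, hlen, ih (P ++ [v]) R hR']
        simp [pvMerge, h]
      · have hRne : R ≠ [] := by
          intro hnil
          rw [hnil] at hR
          simp [h] at hR
        obtain ⟨r, R', rfl⟩ := List.exists_cons_of_ne_nil hRne
        have hR' : R'.length = (vs.filter (fun v => !(PySem.Int.mod v n == 0))).length := by
          simpa [h] using hR
        have hlen : ((P.length : Int) + 1) = ((P ++ [r]).length : Int) := by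
          simp
        have hsplit : P ++ r :: R' = (P ++ [r]) ++ R' := by simp
        rw [pvMult, if_neg h, hsplit, hlen, ih (P ++ [r]) R' hR']
        simp [pvMerge, h]

-- ===== VERDICT (by name: the statement is the Claim_ definition above) =====
theorem inverse_spec : Claim_equal_inverse := by
  intro inputs n _ _
  unfold Spec_inverse inverse inverse_alt
  rw [pvA_phase1, pvB_foldl]
  have := pvA_phase2 n inputs []
      ((inputs.filter (fun v => !(PySem.Int.mod v n == 0))).reverse)
      (by simp)
  simpa using this
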